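-- pv_equiv track=rewrite | github.com/aamrlyman/2024-Advent-of-Coding | Day 2/day_2.py | changingBy3orLess
-- ===== SOURCE A (Python) =====
-- def changingBy3orLess(
--     sublist: list[int], isIncreasing: bool, retries: int, limit: int
-- ) -> bool:
--     for index in range(len(sublist) - 1):
--         diff = (
--             sublist[index + 1] - sublist[index]
--             if isIncreasing
--             else sublist[index] - sublist[index + 1]
--         )
--         if diff > 3 or diff <= 0:
--             if retries >= limit:
--                 return False
--             list1 = sublist[:index] + sublist[index + 1 :]
--             list2 = sublist[: index + 1] + sublist[index + 2 :]
--             retries += 1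
--             return changingBy3orLess(
--                 list1, isIncreasing, retries, limit
--             ) or changingBy3orLess(list2, isIncreasing, retries, limit)
--     return True
-- ===== SOURCE B (Python) =====
-- def _first_violation(lst, isIncreasing):
--     for i, (a, b) in enumerate(zip(lst, lst[1:])):
--         d = b - a if isIncreasing else a - b
--         if d > 3 or d <= 0:
--             return i
--     return None
--
--
-- def changingBy3orLess(
--     sublist: list[int], isIncreasing: bool, retries: int, limit: int
-- ) -> bool:
--     stack = [(sublist, retries)]
--     while stack:
--         lst, r = stack.pop()
--         i = _first_violation(lst, isIncreasing)
--         if i is None: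
--             return True
--         if r < limit:
--             stack.append((lst[:i] + lst[i + 1:], r + 1))
--             stack.append((lst[:i + 1] + lst[i + 2:], r + 1))
--     return False
-- ===== Notes on version B (the rewrite author's own statement) =====
-- stated objective: alternative
-- what changed: Replaces A's branching recursion with an explicit stack of (candidate list, retries) states drained by a single loop that scans each popped candidate pairwise for its first violation; correctness rests on the fact that the result is True iff some node of the removal tree scans clean, so exploration order is irrelevant.
import Mathlib
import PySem

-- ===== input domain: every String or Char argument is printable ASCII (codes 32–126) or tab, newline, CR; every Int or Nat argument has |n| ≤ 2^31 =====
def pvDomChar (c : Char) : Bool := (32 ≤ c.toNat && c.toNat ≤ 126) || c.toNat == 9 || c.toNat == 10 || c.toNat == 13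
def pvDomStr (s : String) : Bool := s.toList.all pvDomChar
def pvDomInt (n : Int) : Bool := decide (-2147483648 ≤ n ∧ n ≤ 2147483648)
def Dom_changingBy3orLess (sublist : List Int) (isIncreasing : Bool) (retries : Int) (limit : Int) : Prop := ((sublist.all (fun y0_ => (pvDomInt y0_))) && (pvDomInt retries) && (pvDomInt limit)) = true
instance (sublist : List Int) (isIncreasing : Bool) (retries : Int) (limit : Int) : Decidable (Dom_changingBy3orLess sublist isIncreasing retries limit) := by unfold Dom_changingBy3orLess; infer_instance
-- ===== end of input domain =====

-- B replaces A's branching recursion with an explicit worklist of (list, retries) states;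
-- same cost, alternative decomposition (the result is True iff some removal branch scans clean).

-- ===== PORT A =====
-- A's for-loop over range(len-1) with early returns, as a recursion on the loop index.
-- The fuel parameter is only a structural-recursion totality guard; the fuel supplied
-- below always exceeds the number of steps, so the 0-fuel arm is never reached.
-- List indices are always in range here, so List.getD is exact; the slices have
-- nonnegative in-range bounds, so take/drop are exact.
def changingBy3orLessGo (fuel : Nat) (sublist : List Int) (isIncreasing : Bool) (retries : Int) (limit : Int) (index : Nat) : Bool :=
  match fuel with
  | 0 => true
  | fuel + 1 =>
    if index < sublist.length - 1 then
      let diff := if isIncreasing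
        then sublist.getD (index + 1) 0 - sublist.getD index 0
        else sublist.getD index 0 - sublist.getD (index + 1) 0
      if diff > 3 ∨ diff ≤ 0 then
        if retries ≥ limit then false
        else
          let list1 := sublist.take index ++ sublist.drop (index + 1)
          let list2 := sublist.take (index + 1) ++ sublist.drop (index + 2)
          changingBy3orLessGo fuel list1 isIncreasing (retries + 1) limit 0 ||
            changingBy3orLessGo fuel list2 isIncreasing (retries + 1) limit 0
      else
        changingBy3orLessGo fuel sublist isIncreasing retries limit (index + 1)
    else
      true

def changingBy3orLess (sublist : List Int) (isIncreasing : Bool) (retries : Int) (limit : Int) : Bool :=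
  changingBy3orLessGo ((sublist.length + 1) * (sublist.length + 1)) sublist isIncreasing retries limit 0

-- ===== PORT B =====
-- B's pairwise scan for the first violating position (zip of the list with its tail).
def firstViolB (lst : List Int) (isIncreasing : Bool) : Option Nat :=
  match lst with
  | a :: b :: rest =>
    let d := if isIncreasing then b - a else a - b
    if d > 3 ∨ d ≤ 0 then some 0
    else (firstViolB (b :: rest) isIncreasing).map (· + 1)
  | _ => none

-- B's while-loop over the explicit stack (head of the list = top of the stack);
-- fuel is again only a totality guard, supplied large enough never to run out.
def loopB (fuel : Nat) (stack : List (List Int × Int)) (isIncreasing : Bool) (limit : Int) : Bool :=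
  match fuel, stack with
  | _, [] => false
  | 0, _ => false
  | fuel + 1, (lst, r) :: rest =>
    match firstViolB lst isIncreasing with
    | none => true
    | some i =>
      if r < limit then
        loopB fuel ((lst.take (i + 1) ++ lst.drop (i + 2), r + 1) ::
          (lst.take i ++ lst.drop (i + 1), r + 1) :: rest) isIncreasing limit
      else
        loopB fuel rest isIncreasing limit

def changingBy3orLess_alt (sublist : List Int) (isIncreasing : Bool) (retries : Int) (limit : Int) : Bool :=
  loopB (3 ^ sublist.length + 1) [(sublist, retries)] isIncreasing limit

-- ===== PRECONDITION & SPEC =====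
def Spec_changingBy3orLess (sublist : List Int) (isIncreasing : Bool) (retries : Int) (limit : Int) (out : Bool) : Prop := out = changingBy3orLess_alt sublist isIncreasing retries limit
instance (sublist : List Int) (isIncreasing : Bool) (retries : Int) (limit : Int) (out : Bool) : Decidable (Spec_changingBy3orLess sublist isIncreasing retries limit out) := by unfold Spec_changingBy3orLess; infer_instance

-- ===== CLAIM (what is proved, stated in full; the proofs are below) =====
def Claim_equal_changingBy3orLess : Prop := ∀ (sublist : List Int) (isIncreasing : Bool) (retries : Int) (limit : Int), Dom_changingBy3orLess sublist isIncreasing retries limit → Spec_changingBy3orLess sublist isIncreasing retries limit (changingBy3orLess sublist isIncreasing retries limit)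

-- ===== LEMMAS AND PROOFS =====

-- measure of A's recursion: strictly decreases at every recursive call of changingBy3orLessGo
def goAMeas (l : List Int) (idx : Nat) : Nat := l.length * l.length + (l.length - idx)

-- measure of B's worklist: strictly decreases at every iteration of loopB
def msB (stack : List (List Int × Int)) : Nat := (stack.map (fun p => 3 ^ p.1.length)).sum

theorem sq_expand (L : Nat) : (L + 1) * (L + 1) = L * L + L + L + 1 := by ring

theorem measA_drop (L idx n : Nat) (h2 : idx + 2 ≤ L) (hm : L * L + (L - idx) ≤ n) :
    (L - 1) * (L - 1) + (L - 1) < n := by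
  obtain ⟨k, rfl⟩ : ∃ k, L = k + 1 := ⟨L - 1, by omega⟩
  have h := sq_expand k
  simp only [Nat.add_sub_cancel]
  omega

theorem measA_fuel (L : Nat) : L * L + L < (L + 1) * (L + 1) := by
  have h := sq_expand L
  omega

theorem firstViolB_le : ∀ (lst : List Int) (inc : Bool) (i : Nat),
    firstViolB lst inc = some i → i + 2 ≤ lst.length
  | a :: b :: rest, inc, i, h => by
    simp only [firstViolB] at h
    split at h <;> split at h
    all_goals first
      | (injection h with h
         simp only [List.length_cons]
         omega)
      | (simp only [Option.map_eq_some_iff] at h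
         obtain ⟨j, hj, rfl⟩ := h
         have := firstViolB_le (b :: rest) inc j hj
         simp only [List.length_cons] at this ⊢
         omega)
  | [], _, _, h => by simp [firstViolB] at h
  | [_], _, _, h => by simp [firstViolB] at h

-- abbreviation for the statement proved about changingBy3orLessGo for a given measure bound
def GoAEqP (m : Nat) : Prop := ∀ (l : List Int) (inc : Bool) (r lim : Int) (idx fuel : Nat),
    goAMeas l idx ≤ m → m < fuel →
    changingBy3orLessGo fuel l inc r lim idx =
      (match firstViolB (l.drop idx) inc with
      | none => true
      | some j =>
        if r ≥ lim then false
        else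
          changingBy3orLess (l.take (idx + j) ++ l.drop (idx + j + 1)) inc (r + 1) lim ||
          changingBy3orLess (l.take (idx + j + 1) ++ l.drop (idx + j + 2)) inc (r + 1) lim)

-- a full-fuel recursive call equals the defined function, given the induction hypothesis
theorem goA_call (n : Nat) (l1 : List Int) (inc : Bool) (r lim : Int) (f : Nat)
    (hmn : goAMeas l1 0 < n) (hfn : n ≤ f)
    (ih : ∀ m, m < n → GoAEqP m) :
    changingBy3orLessGo f l1 inc r lim 0 = changingBy3orLess l1 inc r lim := by
  rw [ih (goAMeas l1 0) hmn l1 inc r lim 0 f le_rfl (by omega)]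
  rw [show changingBy3orLess l1 inc r lim =
      changingBy3orLessGo ((l1.length + 1) * (l1.length + 1)) l1 inc r lim 0 from rfl]
  rw [ih (goAMeas l1 0) hmn l1 inc r lim 0 _ le_rfl (by unfold goAMeas; exact measA_fuel l1.length)]

-- A's index scan from `idx`, run with enough fuel, sees exactly B's pairwise scan of
-- `l.drop idx`, and on a violation branches into the two full-fuel recursive calls.
theorem goA_eq (n : Nat) : GoAEqP n := by
  induction n using Nat.strong_induction_on with
  | _ n ih =>
    intro l inc r lim idx fuel hm hf
    obtain ⟨f, rfl⟩ : ∃ f, fuel = f + 1 := ⟨fuel - 1, by omega⟩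
    unfold goAMeas at hm
    rw [changingBy3orLessGo]
    by_cases hlt : idx < l.length - 1
    · -- at least two elements remain from idx
      have hio : idx < l.length := by omega
      have hi1 : idx + 1 < l.length := by omega
      have hd : l.drop idx =
          l.getD idx 0 :: l.getD (idx + 1) 0 :: l.drop (idx + 2) := by
        have e1 : l.drop idx = l[idx] :: l.drop (idx + 1) :=
          List.drop_eq_getElem_cons hio
        have e2 : l.drop (idx + 1) = l[idx + 1] :: l.drop (idx + 2) :=
          List.drop_eq_getElem_cons hi1
        rw [e1, e2, List.getD_eq_getElem _ _ hio, List.getD_eq_getElem _ _ hi1]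
      simp only [hlt, if_true]
      rw [hd]
      simp only [firstViolB]
      by_cases hv : (if inc then l.getD (idx + 1) 0 - l.getD idx 0
          else l.getD idx 0 - l.getD (idx + 1) 0) > 3 ∨
          (if inc then l.getD (idx + 1) 0 - l.getD idx 0
          else l.getD idx 0 - l.getD (idx + 1) 0) ≤ 0
      · -- violation at idx: both sides branch into the two reduced lists
        simp only [hv, if_true]
        by_cases hr : r ≥ lim
        · simp [hr]
        · simp only [hr, if_false, Nat.add_zero]
          have h2 : idx + 2 ≤ l.length := by omega
          have hn : n ≤ f := by omega
          have hm1 : goAMeas (l.take idx ++ l.drop (idx + 1)) 0 < n := by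
            unfold goAMeas
            simp only [List.length_append, List.length_take, List.length_drop, Nat.sub_zero]
            have e : min idx l.length + (l.length - (idx + 1)) = l.length - 1 := by omega
            rw [e]
            exact measA_drop l.length idx n h2 hm
          have hm2 : goAMeas (l.take (idx + 1) ++ l.drop (idx + 2)) 0 < n := by
            unfold goAMeas
            simp only [List.length_append, List.length_take, List.length_drop, Nat.sub_zero]
            have e : min (idx + 1) l.length + (l.length - (idx + 2)) = l.length - 1 := by omega
            rw [e]
            exact measA_drop l.length idx n h2 hm
          rw [goA_call n (l.take idx ++ l.drop (idx + 1)) inc (r + 1) lim f hm1 hn ih]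
          rw [goA_call n (l.take (idx + 1) ++ l.drop (idx + 2)) inc (r + 1) lim f hm2 hn ih]
      · -- no violation at idx: step the scan
        simp only [hv, if_false]
        have hlen1 : (l.take idx ++ l.drop (idx + 1)).length = l.length - 1 := by
          simp only [List.length_append, List.length_take, List.length_drop]; omega
        have hdrop : l.drop (idx + 1) =
            l.getD (idx + 1) 0 :: l.drop (idx + 2) := by
          rw [List.drop_eq_getElem_cons hi1, List.getD_eq_getElem _ _ hi1]
        have hrec : changingBy3orLessGo f l inc r lim (idx + 1) =
            (match firstViolB (l.drop (idx + 1)) inc with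
            | none => true
            | some j =>
              if r ≥ lim then false
              else
                changingBy3orLess (l.take (idx + 1 + j) ++ l.drop (idx + 1 + j + 1)) inc (r + 1) lim ||
                changingBy3orLess (l.take (idx + 1 + j + 1) ++ l.drop (idx + 1 + j + 2)) inc (r + 1) lim) := by
          exact ih (goAMeas l (idx + 1)) (by unfold goAMeas; omega) l inc r lim (idx + 1) f
            le_rfl (by unfold goAMeas; omega)
        rw [hrec, ← hdrop]
        match hfv : firstViolB (l.drop (idx + 1)) inc with
        | none => simp
        | some j =>
          simp only [Option.map_some]
          have e1 : idx + 1 + j = idx + (j + 1) := by omega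
          simp only [e1]
    · -- at most one element remains: the loop exits, the scan finds nothing
      simp only [hlt, if_false]
      have hlen : (l.drop idx).length ≤ 1 := by simp; omega
      match hd : l.drop idx with
      | [] => rfl
      | [a] => rfl
      | a :: b :: t => rw [hd] at hlen; simp at hlen
-- A's one-step characterisation in terms of B's scan.
theorem A_char (l : List Int) (inc : Bool) (r lim : Int) :
    changingBy3orLess l inc r lim =
      (match firstViolB l inc with
      | none => true
      | some i =>
        if r < lim then
          changingBy3orLess (l.take i ++ l.drop (i + 1)) inc (r + 1) lim ||
          changingBy3orLess (l.take (i + 1) ++ l.drop (i + 2)) inc (r + 1) lim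
        else false) := by
  show changingBy3orLessGo ((l.length + 1) * (l.length + 1)) l inc r lim 0 = _
  rw [goA_eq (goAMeas l 0) l inc r lim 0 _ le_rfl (by unfold goAMeas; exact measA_fuel l.length)]
  simp only [List.drop_zero, Nat.zero_add]
  match firstViolB l inc with
  | none => rfl
  | some i =>
    by_cases hr : r < lim
    · simp [hr, not_le.mpr hr]
    · simp [hr, not_lt.mp hr]

theorem msB_cons (l : List Int) (r : Int) (rest : List (List Int × Int)) :
    msB ((l, r) :: rest) = 3 ^ l.length + msB rest := by
  simp [msB]

theorem msB_dec (lst : List Int) (i : Nat) (r : Int) (rest : List (List Int × Int))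
    (h2 : i + 2 ≤ lst.length) :
    msB ((lst.take (i + 1) ++ lst.drop (i + 2), r + 1) ::
        (lst.take i ++ lst.drop (i + 1), r + 1) :: rest) < msB ((lst, r) :: rest) := by
  simp only [msB, List.map_cons, List.sum_cons, List.length_append, List.length_take,
    List.length_drop]
  obtain ⟨k, hk⟩ : ∃ k, lst.length = k + 2 := ⟨lst.length - 2, by omega⟩
  rw [hk] at h2 ⊢
  have e1 : min (i + 1) (k + 2) = i + 1 := by omega
  have e2 : min i (k + 2) = i := by omega
  rw [e1, e2]
  have e3 : i + 1 + (k + 2 - (i + 2)) = k + 1 := by omega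
  have e4 : i + (k + 2 - (i + 1)) = k + 1 := by omega
  rw [e3, e4]
  have h3 : 0 < 3 ^ (k + 1) := Nat.pow_pos (by norm_num)
  have h4 : 3 ^ (k + 2) = 3 ^ (k + 1) * 3 := pow_succ 3 (k + 1)
  omega

-- the worklist loop, run with enough fuel, returns true iff some state on the stack satisfies A
theorem loopB_any : ∀ (fuel : Nat) (stack : List (List Int × Int)) (inc : Bool) (lim : Int),
    msB stack < fuel →
    loopB fuel stack inc lim = stack.any (fun p => changingBy3orLess p.1 inc p.2 lim) := by
  intro fuel
  induction fuel with
  | zero => intro stack inc lim hm; omega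
  | succ f ih =>
    intro stack inc lim hm
    match stack with
    | [] => rfl
    | (lst, r) :: rest =>
      rw [msB_cons] at hm
      have h3 : 0 < 3 ^ lst.length := Nat.pow_pos (by norm_num)
      rw [loopB]
      cases hv : firstViolB lst inc with
      | none =>
        simp only [List.any_cons]
        rw [A_char, hv]
        simp
      | some i =>
        by_cases hr : r < lim
        · simp only [hr, if_true]
          rw [ih _ inc lim (by
            have hd := msB_dec lst i r rest (firstViolB_le lst inc i hv)
            have e := msB_cons lst r rest
            omega)]
          simp only [List.any_cons]
          rw [A_char lst inc r lim, hv]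
          simp only [hr, if_true]
          cases changingBy3orLess (lst.take i ++ lst.drop (i + 1)) inc (r + 1) lim <;>
            cases changingBy3orLess (lst.take (i + 1) ++ lst.drop (i + 2)) inc (r + 1) lim <;>
            simp
        · simp only [hr, if_false]
          rw [ih _ inc lim (by omega)]
          simp only [List.any_cons]
          rw [A_char lst inc r lim, hv]
          simp [hr]

-- ===== VERDICT (by name: the statement is the Claim_ definition above) =====
theorem changingBy3orLess_spec : Claim_equal_changingBy3orLess := by
  intro sublist isIncreasing retries limit _
  unfold Spec_changingBy3orLess changingBy3orLess_alt
  rw [loopB_any _ _ _ _ (by rw [msB_cons]; simp [msB])]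
  simp
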